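-- pv_equiv track=rewrite | github.com/physycom/city-pro | python/work_mdt/UsefulStructures.py | InitAvFeat2Class2Day
-- ===== SOURCE A (Python) =====
-- from collections import defaultdict
--
-- def InitAvFeat2Class2Day(StrDates,Day2StrClass2IntClass,Feature2Label):
--     AvFeat2Class2Day = defaultdict(dict)
--     for Feature in Feature2Label.keys():
--         AvFeat2Class2Day[Feature] = defaultdict(dict)
--         for StrDay in StrDates:
--             for StrClass in Day2StrClass2IntClass[StrDay].keys():
--                 AvFeat2Class2Day[Feature][StrClass] = {StrDay:[]}
--     return AvFeat2Class2Day
-- ===== SOURCE B (Python) =====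
-- from collections import defaultdict
--
-- def InitAvFeat2Class2Day(StrDates, Day2StrClass2IntClass, Feature2Label):
--     # One pass over the days builds a class -> last-day index; each feature then
--     # gets a fresh copy of the same small table (A redoes the day scan per feature).
--     AvFeat2Class2Day = defaultdict(dict)
--     if Feature2Label:
--         Class2LastDay = {}
--         for StrDay in StrDates:
--             for StrClass in Day2StrClass2IntClass[StrDay]:
--                 Class2LastDay[StrClass] = StrDay
--         for Feature in Feature2Label:
--             Inner = defaultdict(dict)
--             Inner.update({StrClass: {StrDay: []} for StrClass, StrDay in Class2LastDay.items()})
--             AvFeat2Class2Day[Feature] = Inner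
--     return AvFeat2Class2Day
-- ===== Notes on version B (the rewrite author's own statement) =====
-- stated objective: faster
-- what changed: B builds the class-to-last-day index once in a single pass over the days and then gives every feature a fresh copy of that small table, instead of A's re-scanning all days and their class dicts for every feature.
import Mathlib
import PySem

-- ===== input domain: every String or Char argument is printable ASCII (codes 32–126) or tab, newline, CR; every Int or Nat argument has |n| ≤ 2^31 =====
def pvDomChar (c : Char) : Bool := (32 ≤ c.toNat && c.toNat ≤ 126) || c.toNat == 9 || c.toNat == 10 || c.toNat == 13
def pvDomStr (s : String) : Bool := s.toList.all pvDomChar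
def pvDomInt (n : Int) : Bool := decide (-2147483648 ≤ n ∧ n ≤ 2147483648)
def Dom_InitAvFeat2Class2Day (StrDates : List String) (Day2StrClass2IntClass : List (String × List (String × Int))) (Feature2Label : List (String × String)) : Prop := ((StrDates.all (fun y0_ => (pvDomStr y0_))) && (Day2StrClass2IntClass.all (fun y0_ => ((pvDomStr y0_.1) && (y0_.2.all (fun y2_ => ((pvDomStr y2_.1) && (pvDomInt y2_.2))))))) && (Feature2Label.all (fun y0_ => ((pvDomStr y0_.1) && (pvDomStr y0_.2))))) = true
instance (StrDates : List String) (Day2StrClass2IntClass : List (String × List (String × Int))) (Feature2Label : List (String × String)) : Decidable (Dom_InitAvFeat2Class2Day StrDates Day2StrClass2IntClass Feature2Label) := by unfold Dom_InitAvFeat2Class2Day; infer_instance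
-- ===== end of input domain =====

-- B builds the class->last-day index once and copies it per feature, instead of rescanning all days for every feature.


-- ===== PORT A =====
-- A: for every feature, re-scan all days, overwriting AvFeat[Feature][StrClass] with {StrDay: []}.
def pvInnerA (StrDates : List String) (Day2StrClass2IntClass : List (String × List (String × Int))) : PySem.Dict String (List (String × List Int)) :=
  StrDates.foldl (fun inner StrDay =>
    (PySem.List.dedup (((PySem.Dict.mk Day2StrClass2IntClass).getD StrDay []).map Prod.fst)).foldl
      (fun inner StrClass => inner.insert StrClass [(StrDay, ([] : List Int))]) inner)
    PySem.Dict.empty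

def InitAvFeat2Class2Day (StrDates : List String) (Day2StrClass2IntClass : List (String × List (String × Int))) (Feature2Label : List (String × String)) : List (String × List (String × List (String × List Int))) :=
  ((PySem.List.dedup (Feature2Label.map Prod.fst)).foldl
    (fun acc Feature => acc.insert Feature (pvInnerA StrDates Day2StrClass2IntClass))
    (PySem.Dict.empty : PySem.Dict String (PySem.Dict String (List (String × List Int))))).items.map
    (fun p => (p.1, p.2.items))

-- ===== PORT B =====
-- B: build the class -> last-day index once, then hand each feature a fresh copy of the same table.
def pvClass2LastDay (StrDates : List String) (Day2StrClass2IntClass : List (String × List (String × Int))) : PySem.Dict String String :=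
  StrDates.foldl (fun d StrDay =>
    (PySem.List.dedup (((PySem.Dict.mk Day2StrClass2IntClass).getD StrDay []).map Prod.fst)).foldl
      (fun d StrClass => d.insert StrClass StrDay) d)
    PySem.Dict.empty

def InitAvFeat2Class2Day_alt (StrDates : List String) (Day2StrClass2IntClass : List (String × List (String × Int))) (Feature2Label : List (String × String)) : List (String × List (String × List (String × List Int))) :=
  if Feature2Label.isEmpty then [] else
    let innerItems := (pvClass2LastDay StrDates Day2StrClass2IntClass).items.map
      (fun p => (p.1, [(p.2, ([] : List Int))]))
    (PySem.List.dedup (Feature2Label.map Prod.fst)).map (fun f => (f, innerItems))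

-- ===== PRECONDITION & SPEC =====
-- Pre_ excludes exactly the inputs where Python A raises KeyError: a feature exists and some
-- day of StrDates is missing from Day2StrClass2IntClass (B raises there too).
def Pre_InitAvFeat2Class2Day (StrDates : List String) (Day2StrClass2IntClass : List (String × List (String × Int))) (Feature2Label : List (String × String)) : Prop :=
  Feature2Label = [] ∨ ∀ d ∈ StrDates, d ∈ Day2StrClass2IntClass.map Prod.fst
instance (StrDates : List String) (Day2StrClass2IntClass : List (String × List (String × Int))) (Feature2Label : List (String × String)) : Decidable (Pre_InitAvFeat2Class2Day StrDates Day2StrClass2IntClass Feature2Label) := by unfold Pre_InitAvFeat2Class2Day; infer_instance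
def pvWitness_InitAvFeat2Class2Day : List String × (List (String × List (String × Int))) × (List (String × String)) :=
  (["d1"], [("d1", [("c1", 0)])], [("f", "lab")])

def Spec_InitAvFeat2Class2Day (StrDates : List String) (Day2StrClass2IntClass : List (String × List (String × Int))) (Feature2Label : List (String × String)) (out : List (String × List (String × List (String × List Int)))) : Prop := out = InitAvFeat2Class2Day_alt StrDates Day2StrClass2IntClass Feature2Label
instance (StrDates : List String) (Day2StrClass2IntClass : List (String × List (String × Int))) (Feature2Label : List (String × String)) (out : List (String × List (String × List (String × List Int)))) : Decidable (Spec_InitAvFeat2Class2Day StrDates Day2StrClass2IntClass Feature2Label out) := by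
  unfold Spec_InitAvFeat2Class2Day
  exact @instDecidableEqList _ (fun c d => @instDecidableEqProd _ _ _ _ c d) _ _

-- ===== CLAIM (what is proved, stated in full; the proofs are below) =====
def Claim_equal_InitAvFeat2Class2Day : Prop := ∀ (StrDates : List String) (Day2StrClass2IntClass : List (String × List (String × Int))) (Feature2Label : List (String × String)), Dom_InitAvFeat2Class2Day StrDates Day2StrClass2IntClass Feature2Label → Pre_InitAvFeat2Class2Day StrDates Day2StrClass2IntClass Feature2Label → Spec_InitAvFeat2Class2Day StrDates Day2StrClass2IntClass Feature2Label (InitAvFeat2Class2Day StrDates Day2StrClass2IntClass Feature2Label)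

-- ===== LEMMAS AND PROOFS =====

-- the value-map linking B's class->last-day index to A's inner class dict
def pvMapD (db : PySem.Dict String String) : PySem.Dict String (List (String × List Int)) :=
  PySem.Dict.mk (db.items.map (fun p => (p.1, [(p.2, ([] : List Int))])))

theorem pvMapD_insert (db : PySem.Dict String String) (c d : String) :
    (pvMapD db).insert c [(d, ([] : List Int))] = pvMapD (db.insert c d) := by
  have hcont : (pvMapD db).contains c = db.contains c := by
    simp [pvMapD, PySem.Dict.contains, List.any_map, Function.comp_def]
  simp only [PySem.Dict.insert, hcont]
  by_cases h : db.contains c = true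
  · simp only [h, if_pos, pvMapD, List.map_map]
    congr 1
    apply List.map_congr_left
    intro p _
    by_cases hp : p.1 = c <;> simp [hp]
  · simp [h, pvMapD]

theorem pvMapD_foldl_classes (cs : List String) (day : String) (db : PySem.Dict String String) :
    cs.foldl (fun inner c => inner.insert c [(day, ([] : List Int))]) (pvMapD db)
      = pvMapD (cs.foldl (fun d c => d.insert c day) db) := by
  induction cs generalizing db with
  | nil => rfl
  | cons c cs ih => simpa [pvMapD_insert] using ih (db.insert c day)

theorem pvMapD_foldl_days (f : String → List String) (L : List String) (db : PySem.Dict String String) :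
    L.foldl (fun inner day => (f day).foldl (fun inner c => inner.insert c [(day, ([] : List Int))]) inner) (pvMapD db)
      = pvMapD (L.foldl (fun d day => (f day).foldl (fun d c => d.insert c day) d) db) := by
  induction L generalizing db with
  | nil => rfl
  | cons day L ih =>
    simp only [List.foldl_cons, pvMapD_foldl_classes]
    exact ih _

theorem pvInner_eq (StrDates : List String) (Day2StrClass2IntClass : List (String × List (String × Int))) :
    pvInnerA StrDates Day2StrClass2IntClass = pvMapD (pvClass2LastDay StrDates Day2StrClass2IntClass) := by
  have h := pvMapD_foldl_days
    (fun day => PySem.List.dedup (((PySem.Dict.mk Day2StrClass2IntClass).getD day []).map Prod.fst))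
    StrDates PySem.Dict.empty
  simpa [pvInnerA, pvClass2LastDay, pvMapD] using h

theorem pvOuter_items (StrDates : List String) (Day2StrClass2IntClass : List (String × List (String × Int))) (l : List String) (hnd : l.Nodup) :
    ((l.foldl (fun acc Feature => acc.insert Feature (pvInnerA StrDates Day2StrClass2IntClass))
        (PySem.Dict.empty : PySem.Dict String (PySem.Dict String (List (String × List Int))))).items)
      = l.map (fun f => (f, pvInnerA StrDates Day2StrClass2IntClass)) := by
  have h := PySem.Dict.items_foldl_insert_fresh (l := l) (k := fun x => x)
    (v := fun _ => pvInnerA StrDates Day2StrClass2IntClass)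
    (d := (PySem.Dict.empty : PySem.Dict String (PySem.Dict String (List (String × List Int)))))
    (by intro a _; exact PySem.Dict.contains_empty a)
    (by simpa using hnd)
  simpa using h

-- ===== VERDICT (by name: the statement is the Claim_ definition above) =====
theorem InitAvFeat2Class2Day_spec : Claim_equal_InitAvFeat2Class2Day := by
  intro StrDates Day2 F2L _ _
  unfold Spec_InitAvFeat2Class2Day InitAvFeat2Class2Day InitAvFeat2Class2Day_alt
  cases F2L with
  | nil => rfl
  | cons p rest =>
    simp only [List.isEmpty_cons, Bool.false_eq_true, if_neg, not_false_iff]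
    have hnd : (PySem.List.dedup ((p :: rest).map Prod.fst)).Nodup :=
      PySem.Set.nodup_ofList _
    rw [pvOuter_items StrDates Day2 _ hnd]
    simp [List.map_map, pvInner_eq, pvMapD, Function.comp_def]
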